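-- pv_equiv track=rewrite | github.com/lingjiehao/PT-P300BT | ptstatus.py | describe_flag
-- ===== SOURCE A (Python) =====
-- def describe_flag(flagset, descset):
--     flags = []
--     ctr = 0
--     if flagset == 0:
--         return 'None'
--     while flagset != 0:
--         flag = flagset & 1
--         if flag:
--             flags.append(descset.get(ctr, 'bit{}'.format(ctr)))
--         ctr += 1
--         flagset >>= 1
--     return ', '.join(flags)
-- ===== SOURCE B (Python) =====
-- def describe_flag(flagset, descset):
--     # Kernighan's trick: peel off the lowest set bit each iteration
--     # (one loop iteration per SET bit, not per bit position).
--     if flagset == 0: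
--         return 'None'
--     flags = []
--     m = flagset
--     while m:
--         low = m & (m - 1)                 # m with its lowest set bit cleared
--         pos = (m ^ low).bit_length() - 1  # position of that lowest set bit
--         flags.append(descset.get(pos, 'bit{}'.format(pos)))
--         m = low
--     return ', '.join(flags)
-- ===== Notes on version B (the rewrite author's own statement) =====
-- stated objective: alternative
-- what changed: B uses Kernighan's lowest-set-bit algorithm: each iteration isolates the lowest set bit with m&(m-1) and m^low, gets its position via bit_length, and clears it, so the loop runs once per SET bit instead of once per bit position as A's shift-and-mask scan does.
import Mathlib
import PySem

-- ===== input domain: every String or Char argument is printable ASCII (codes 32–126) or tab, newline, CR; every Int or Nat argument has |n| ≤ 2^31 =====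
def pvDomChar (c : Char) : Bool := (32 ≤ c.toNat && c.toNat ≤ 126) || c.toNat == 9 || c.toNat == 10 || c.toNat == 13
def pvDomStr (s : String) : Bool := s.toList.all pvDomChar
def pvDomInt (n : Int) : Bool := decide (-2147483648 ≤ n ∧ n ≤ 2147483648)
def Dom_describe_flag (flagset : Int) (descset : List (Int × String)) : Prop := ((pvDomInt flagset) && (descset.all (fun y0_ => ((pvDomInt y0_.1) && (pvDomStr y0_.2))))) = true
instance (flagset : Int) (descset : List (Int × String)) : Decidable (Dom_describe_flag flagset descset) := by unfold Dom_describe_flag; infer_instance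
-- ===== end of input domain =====

-- B replaces A's per-bit-position shift-and-mask scan by Kernighan's lowest-set-bit peeling (one iteration per set bit); alternative algorithm, same result.

-- shared helper: descset.get(pos, 'bit{}'.format(pos)) (the identical expression in both Pythons)
def pvDesc (descset : List (Int × String)) (pos : Int) : String :=
  PySem.Dict.getD (PySem.Dict.ofList descset) pos ("bit" ++ PySem.Int.toStr pos)

-- ===== PORT A =====
-- the while loop of A; Python's loop condition is `flagset != 0` — the `≤ 0` guard only makes
-- the recursion total on negatives, where the Python loop never terminates (excluded by Pre_)
def describe_flag_loop (descset : List (Int × String)) (flagset ctr : Int) (flags : List String) : List String :=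
  if _h : flagset ≤ 0 then flags
  else
    let flag := PySem.Int.band flagset 1
    let flags' := if flag ≠ 0 then flags ++ [pvDesc descset ctr] else flags
    describe_flag_loop descset (flagset >>> (1:Nat)) (ctr + 1) flags'
termination_by flagset.toNat
decreasing_by
  obtain ⟨m, rfl⟩ := Int.eq_ofNat_of_zero_le (by omega : (0:Int) ≤ flagset)
  show ((m >>> 1 : Nat) : Int).toNat < _
  simp only [Int.toNat_natCast, Nat.shiftRight_eq_div_pow, pow_one]
  omega

def describe_flag (flagset : Int) (descset : List (Int × String)) : String :=
  if flagset = 0 then "None"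
  else PySem.Str.join ", " (describe_flag_loop descset flagset 0 [])

-- ===== PORT B =====
-- the while loop of B; same `≤ 0` totalisation remark as above (B's loop also never
-- terminates on negative m in Python; excluded by Pre_)
def describe_flag_alt_loop (descset : List (Int × String)) (m : Int) (flags : List String) : List String :=
  if _h : m ≤ 0 then flags
  else
    let low := PySem.Int.band m (m - 1)
    let pos : Int := (PySem.Int.bitLength (PySem.Int.bxor m low) : Int) - 1
    describe_flag_alt_loop descset low (flags ++ [pvDesc descset pos])
termination_by m.toNat
decreasing_by
  rw [PySem.Int.band_of_nonneg (by omega) (by omega : (0:Int) ≤ m - 1)]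
  have h := Nat.and_le_right (n := m.toNat) (m := (m - 1).toNat)
  simp only [Int.toNat_natCast]
  omega

def describe_flag_alt (flagset : Int) (descset : List (Int × String)) : String :=
  if flagset = 0 then "None"
  else PySem.Str.join ", " (describe_flag_alt_loop descset flagset [])

-- ===== PRECONDITION & SPEC =====
-- Pre_ excludes negative flagset, on which BOTH Python loops never terminate (no return value).
def Pre_describe_flag (flagset : Int) (_descset : List (Int × String)) : Prop := 0 ≤ flagset
instance (flagset : Int) (descset : List (Int × String)) : Decidable (Pre_describe_flag flagset descset) := by unfold Pre_describe_flag; infer_instance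
def pvWitness_describe_flag : Int × (List (Int × String)) := (5, [(0, "zero"), (7, "seven")])

def Spec_describe_flag (flagset : Int) (descset : List (Int × String)) (out : String) : Prop := out = describe_flag_alt flagset descset
instance (flagset : Int) (descset : List (Int × String)) (out : String) : Decidable (Spec_describe_flag flagset descset out) := by unfold Spec_describe_flag; infer_instance

-- ===== CLAIM (what is proved, stated in full; the proofs are below) =====
def Claim_equal_describe_flag : Prop := ∀ (flagset : Int) (descset : List (Int × String)), Dom_describe_flag flagset descset → Pre_describe_flag flagset descset → Spec_describe_flag flagset descset (describe_flag flagset descset)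

-- ===== LEMMAS AND PROOFS =====

-- ---- bitwise facts ----
lemma and_pred_lt {m : Nat} (hm : 0 < m) : m &&& (m - 1) < m :=
  lt_of_le_of_lt (Nat.and_le_right) (by omega)

lemma two_mul_and_pred (m : Nat) (hm : 0 < m) :
    (2 * m) &&& (2 * m - 1) = 2 * (m &&& (m - 1)) := by
  apply Nat.eq_of_testBit_eq
  intro i
  cases i with
  | zero =>
    have h1 : (2 * m) % 2 = 0 := by omega
    have h2 : (2 * (m &&& (m - 1))) % 2 = 0 := by omega
    simp [Nat.testBit_and, Nat.testBit_zero, h1, h2]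
  | succ i =>
    have h1 : (2 * m) / 2 = m := by omega
    have h2 : (2 * m - 1) / 2 = m - 1 := by omega
    have h3 : (2 * (m &&& (m - 1))) / 2 = m &&& (m - 1) := by omega
    simp only [Nat.testBit_add_one, Nat.and_div_two, h1, h2, h3]

lemma odd_and_pred (m : Nat) : (2 * m + 1) &&& (2 * m) = 2 * m := by
  apply Nat.eq_of_testBit_eq
  intro i
  cases i with
  | zero =>
    have h1 : (2 * m + 1) % 2 = 1 := by omega
    have h2 : (2 * m) % 2 = 0 := by omega
    simp [Nat.testBit_and, Nat.testBit_zero, h1, h2]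
  | succ i =>
    have h1 : (2 * m + 1) / 2 = m := by omega
    have h2 : (2 * m) / 2 = m := by omega
    simp only [Nat.testBit_add_one, Nat.and_div_two, h1, h2]
    simp

lemma two_mul_xor (m x : Nat) : (2 * m) ^^^ (2 * x) = 2 * (m ^^^ x) := by
  apply Nat.eq_of_testBit_eq
  intro i
  cases i with
  | zero =>
    have h1 : (2 * m) % 2 = 0 := by omega
    have h2 : (2 * x) % 2 = 0 := by omega
    have h3 : (2 * (m ^^^ x)) % 2 = 0 := by omega
    simp [Nat.testBit_xor, Nat.testBit_zero, h1, h2, h3]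
  | succ i =>
    have h1 : (2 * m) / 2 = m := by omega
    have h2 : (2 * x) / 2 = x := by omega
    have h3 : (2 * (m ^^^ x)) / 2 = m ^^^ x := by omega
    simp only [Nat.testBit_add_one, Nat.xor_div_two, h1, h2, h3]

lemma odd_xor_even (m : Nat) : (2 * m + 1) ^^^ (2 * m) = 1 := by
  apply Nat.eq_of_testBit_eq
  intro i
  cases i with
  | zero =>
    have h1 : (2 * m + 1) % 2 = 1 := by omega
    have h2 : (2 * m) % 2 = 0 := by omega
    simp [Nat.testBit_xor, Nat.testBit_zero, h1, h2]
  | succ i =>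
    have h1 : (2 * m + 1) / 2 = m := by omega
    have h2 : (2 * m) / 2 = m := by omega
    simp only [Nat.testBit_add_one, Nat.xor_div_two, h1, h2]
    simp

lemma bitLength_pos {x : Nat} (hx : x ≠ 0) : 1 ≤ PySem.Int.bitLength (x : Int) := by
  by_contra h
  have h0 : PySem.Int.bitLength (x : Int) = 0 := by omega
  have hlt := PySem.Int.lt_two_pow_bitLength (x : Int)
  rw [h0] at hlt
  simp at hlt
  omega

lemma bitLength_two_mul {x : Nat} (hx : 0 < x) :
    PySem.Int.bitLength ((2 * x : Nat) : Int) = PySem.Int.bitLength (x : Int) + 1 := by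
  have h := PySem.Int.bitLength_natCast (show 0 < 2 * x by omega)
  have h2 : (2 * x) / 2 = x := by omega
  rw [h, h2]

-- ---- A's loop produces the description of each bit index, in ascending order ----
lemma describe_flag_loop_stop (d : List (Int × String)) (n c : Int) (fs : List String) (hn : n ≤ 0) :
    describe_flag_loop d n c fs = fs := by
  rw [describe_flag_loop]; simp [hn]

lemma describe_flag_loop_step (d : List (Int × String)) (n c : Int) (fs : List String) (hn : ¬ n ≤ 0) :
    describe_flag_loop d n c fs
      = describe_flag_loop d (n >>> (1:Nat)) (c + 1)
          (if PySem.Int.band n 1 ≠ 0 then fs ++ [pvDesc d c] else fs) := by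
  conv_lhs => rw [describe_flag_loop]
  simp [hn]

lemma describe_flag_loop_append (d : List (Int × String)) :
    ∀ k (n c : Int) (fs : List String), n.toNat ≤ k →
      describe_flag_loop d n c fs = fs ++ describe_flag_loop d n c [] := by
  intro k
  induction k with
  | zero =>
    intro n c fs h
    have hn : n ≤ 0 := by omega
    rw [describe_flag_loop_stop d n c fs hn, describe_flag_loop_stop d n c [] hn]; simp
  | succ k ih =>
    intro n c fs h
    by_cases hn : n ≤ 0
    · rw [describe_flag_loop_stop d n c fs hn, describe_flag_loop_stop d n c [] hn]; simp
    · rw [describe_flag_loop_step d n c fs hn, describe_flag_loop_step d n c [] hn]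
      have hlt : (n >>> (1:Nat)).toNat ≤ k := by
        obtain ⟨m, rfl⟩ := Int.eq_ofNat_of_zero_le (by omega : (0:Int) ≤ n)
        show ((m >>> 1 : Nat) : Int).toNat ≤ k
        simp only [Int.toNat_natCast, Nat.shiftRight_eq_div_pow, pow_one] at *
        omega
      rw [ih _ _ _ hlt]
      conv_rhs => rw [ih _ _ _ hlt]
      by_cases hb : PySem.Int.band n 1 ≠ 0 <;> simp [hb]

lemma describe_flag_loop_eq_bitIndices (d : List (Int × String)) :
    ∀ k (m : Nat) (c : Int), m ≤ k →
      describe_flag_loop d (m : Int) c []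
        = (Nat.bitIndices m).map (fun (i : Nat) => pvDesc d (c + (i : Int))) := by
  intro k
  induction k with
  | zero =>
    intro m c h
    have : m = 0 := by omega
    subst this
    rw [describe_flag_loop_stop d _ c [] (by omega)]; simp
  | succ k ih =>
    intro m c h
    by_cases hm : m = 0
    · subst hm; rw [describe_flag_loop_stop d _ c [] (by omega)]; simp
    · have hn : ¬ ((m : Int) ≤ 0) := by omega
      rw [describe_flag_loop_step d _ c [] hn]
      have hsh : ((m : Int) >>> (1:Nat)) = ((m / 2 : Nat) : Int) := by
        show ((m >>> 1 : Nat) : Int) = _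
        simp [Nat.shiftRight_eq_div_pow]
      have hband : PySem.Int.band (m : Int) 1 = ((m % 2 : Nat) : Int) := by
        simp [PySem.Int.band_one]
      have hle2 : m / 2 ≤ k := by omega
      have hle : (((m / 2 : Nat) : Int)).toNat ≤ k := by
        simp only [Int.toNat_natCast]; exact hle2
      rw [describe_flag_loop_append d k _ _ _ (by rw [hsh]; exact hle)]
      rw [hsh, ih (m / 2) (c + 1) hle2]
      rcases Nat.even_or_odd m with he | ho
      · -- even: low bit 0, no append
        obtain ⟨r, hr⟩ := he
        have hm2 : m % 2 = 0 := by omega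
        have hrw : m = 2 * (m / 2) := by omega
        have hif : ¬ ((((0:Nat) : Int)) ≠ 0) := by simp
        rw [hband, hm2, if_neg hif]
        conv_rhs => rw [hrw]
        rw [Nat.bitIndices_two_mul, List.map_map, List.nil_append]
        apply List.map_congr_left
        intro i _
        simp only [Function.comp_apply]
        congr 1
        push_cast
        ring
      · -- odd: low bit 1, append desc c
        obtain ⟨r, hr⟩ := ho
        have hm2 : m % 2 = 1 := by omega
        have hrw : m = 2 * (m / 2) + 1 := by omega
        have hif : (((1:Nat) : Int)) ≠ 0 := by simp
        rw [hband, hm2, if_pos hif]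
        conv_rhs => rw [hrw]
        rw [Nat.bitIndices_two_mul_add_one, List.map_cons, List.map_map]
        simp only [List.nil_append, List.singleton_append, Nat.cast_zero, add_zero]
        congr 1
        apply List.map_congr_left
        intro i _
        simp only [Function.comp_apply]
        congr 1
        push_cast
        ring

-- ---- B's loop: the sequence of peeled lowest-bit positions, and its identification with bitIndices ----
def kpos (m : Nat) : List Nat :=
  if _h : m = 0 then []
  else (PySem.Int.bitLength (((m ^^^ (m &&& (m - 1))) : Nat) : Int) - 1) :: kpos (m &&& (m - 1))
termination_by m
decreasing_by exact and_pred_lt (by omega)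

lemma kpos_zero : kpos 0 = [] := by rw [kpos]; simp

lemma kpos_step (m : Nat) (hm : m ≠ 0) :
    kpos m = (PySem.Int.bitLength (((m ^^^ (m &&& (m - 1))) : Nat) : Int) - 1) :: kpos (m &&& (m - 1)) := by
  conv_lhs => rw [kpos]
  simp [hm]

lemma xor_and_pred_ne {m : Nat} (hm : 0 < m) : m ^^^ (m &&& (m - 1)) ≠ 0 := by
  intro h
  have := Nat.xor_eq_zero_iff.mp h
  have := and_pred_lt hm
  omega

lemma kpos_two_mul : ∀ k (m : Nat), m ≤ k → kpos (2 * m) = (kpos m).map (· + 1) := by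
  intro k
  induction k with
  | zero =>
    intro m h
    have : m = 0 := by omega
    subst this
    simp [kpos_zero]
  | succ k ih =>
    intro m h
    by_cases hm : m = 0
    · subst hm; simp [kpos_zero]
    · have h0 : 0 < m := by omega
      rw [kpos_step (2 * m) (by omega), kpos_step m hm]
      rw [two_mul_and_pred m h0, two_mul_xor, bitLength_two_mul (Nat.pos_of_ne_zero (xor_and_pred_ne h0))]
      rw [ih (m &&& (m - 1)) (by have := and_pred_lt h0; omega)]
      have hbl := bitLength_pos (xor_and_pred_ne h0)
      simp only [List.map_cons]
      congr 1
      omega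

lemma kpos_eq_bitIndices : ∀ k (m : Nat), m ≤ k → kpos m = Nat.bitIndices m := by
  intro k
  induction k with
  | zero =>
    intro m h
    have : m = 0 := by omega
    subst this
    simp [kpos_zero]
  | succ k ih =>
    intro m h
    by_cases hm : m = 0
    · subst hm; simp [kpos_zero]
    · rcases Nat.even_or_odd m with he | ho
      · -- m = 2 * q, q > 0
        obtain ⟨q, hq⟩ := he
        have hq' : m = 2 * q := by omega
        have hqpos : 0 < q := by omega
        rw [hq', kpos_two_mul m q (by omega), ih q (by omega), Nat.bitIndices_two_mul]
      · -- m = 2 * q + 1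
        obtain ⟨q, hq⟩ := ho
        rw [hq]
        rw [kpos_step (2 * q + 1) (by omega)]
        have hand : (2 * q + 1) &&& (2 * q + 1 - 1) = 2 * q := by
          have : 2 * q + 1 - 1 = 2 * q := by omega
          rw [this, odd_and_pred]
        rw [hand, odd_xor_even]
        have h1 : PySem.Int.bitLength ((1 : Nat) : Int) = 1 := by decide
        rw [h1]
        rw [kpos_two_mul m q (by omega), ih q (by omega), Nat.bitIndices_two_mul_add_one]

lemma describe_flag_alt_loop_eq (d : List (Int × String)) :
    ∀ k (m : Nat) (fs : List String), m ≤ k →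
      describe_flag_alt_loop d (m : Int) fs = fs ++ (kpos m).map (fun (i : Nat) => pvDesc d (i : Int)) := by
  intro k
  induction k with
  | zero =>
    intro m fs h
    have : m = 0 := by omega
    subst this
    rw [describe_flag_alt_loop]
    simp [kpos_zero]
  | succ k ih =>
    intro m fs h
    by_cases hm : m = 0
    · subst hm; rw [describe_flag_alt_loop]; simp [kpos_zero]
    · have h0 : 0 < m := by omega
      rw [describe_flag_alt_loop]
      have hn : ¬ ((m : Int) ≤ 0) := by omega
      simp only [hn, dite_false]
      have hc : ((m : Int) - 1) = ((m - 1 : Nat) : Int) := by omega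
      have hband : PySem.Int.band (m : Int) ((m : Int) - 1) = ((m &&& (m - 1) : Nat) : Int) := by
        rw [hc]; exact PySem.Int.band_natCast m (m - 1)
      have hbxor : PySem.Int.bxor (m : Int) ((m &&& (m - 1) : Nat) : Int)
          = ((m ^^^ (m &&& (m - 1)) : Nat) : Int) := PySem.Int.bxor_natCast m (m &&& (m - 1))
      simp only [hband, hbxor]
      rw [ih (m &&& (m - 1)) _ (by have := and_pred_lt h0; omega)]
      rw [kpos_step m hm]
      have hbl := bitLength_pos (xor_and_pred_ne h0)
      simp only [List.map_cons, List.append_assoc, List.singleton_append]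
      congr 3
      omega

-- ===== VERDICT (by name: the statement is the Claim_ definition above) =====
theorem describe_flag_spec : Claim_equal_describe_flag := by
  intro flagset descset _hdom hpre
  unfold Spec_describe_flag describe_flag describe_flag_alt
  by_cases h0 : flagset = 0
  · simp [h0]
  · simp only [h0, if_neg, not_false_iff]
    obtain ⟨m, rfl⟩ := Int.eq_ofNat_of_zero_le hpre
    rw [describe_flag_loop_eq_bitIndices descset m m 0 le_rfl]
    rw [describe_flag_alt_loop_eq descset m m [] le_rfl]
    rw [kpos_eq_bitIndices m m le_rfl]
    simp
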